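-- pv_equiv track=rewrite | github.com/chs991209/python_advanced | data-model/data-model-test/test-namedtuple.py | findalpha
-- ===== SOURCE A (Python) =====
-- def findalpha(passed_list):
--     """
--     Counts the number of the elements of the student codes' list which contains each alphabet from a to z.
--     Each alphabet is the key of the returned dictionary and the value of each alphabet is the counted number of
--     the student-elements of the list which contain each alphabet.
--     Each student code contains the alphabet of each student's class name, and the class names are from A to Z.
--     Author : Chs
--     Date : 20220106
--     :param passed_list: type=class, list
--     :return:passed_studts_distributed_dict: type=class, A: 1, B: 2, ..
--     """
--
--     numof_A = 0
--     numof_B = 0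
--     numof_C = 0
--     numof_D = 0
--     numof_E = 0
--     numof_F = 0
--     numof_G = 0
--     numof_H = 0
--
--     for a in passed_list:
--         if "a" in a:
--             numof_A += 1
--         if "b" in a:
--             numof_B += 1
--         if "c" in a:
--             numof_C += 1
--         if "d" in a:
--             numof_D += 1
--         if "e" in a:
--             numof_E += 1
--         if "f" in a:
--             numof_F += 1
--         if "g" in a:
--             numof_G += 1
--         if "h" in a:
--             numof_H += 1
--         else:
--             pass
--
--     # classnamealpha_list = ["A", "B", "C", "D", "E", "F", "G", "H"]
--     # class_l = classnamealpha_list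
--     # passed_studts_num_list = [
--     #     numof_A,
--     #     numof_B,
--     #     numof_C,
--     #     numof_D,
--     #     numof_E,
--     #     numof_F,
--     #     numof_G,
--     #     numof_H,
--     # ]
--     # passed_num_l = passed_studts_num_list
--
--     # passed_studts_num_listpassed_studts_alpha_distributed = {}
--     # for z in range(len(class_l)):
--     #     passed_studts_alpha_distributed[class_l[z]] = passed_num_l[z]
--     #
--     # return passed_studts_alpha_distributed
--     passed_studts_distributed_dict = {
--         "A": numof_A,
--         "B": numof_B,
--         "C": numof_C,
--         "D": numof_D,
--         "E": numof_E,
--         "F": numof_F,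
--         "G": numof_G,
--         "H": numof_H,
--     }
--
--     return passed_studts_distributed_dict
-- ===== SOURCE B (Python) =====
-- def findalpha(passed_list):
--     return {up: sum(1 for a in passed_list if ch in a)
--             for ch, up in zip("abcdefgh", "ABCDEFGH")}
-- ===== Notes on version B (the rewrite author's own statement) =====
-- stated objective: simpler
-- what changed: Replaces the eight named counters and the single pass with eight unrolled ifs by a dict comprehension that iterates over the eight (letter, key) pairs on the outside and counts matching elements with an inner generator sum, inverting the loop nesting.
import Mathlib
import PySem

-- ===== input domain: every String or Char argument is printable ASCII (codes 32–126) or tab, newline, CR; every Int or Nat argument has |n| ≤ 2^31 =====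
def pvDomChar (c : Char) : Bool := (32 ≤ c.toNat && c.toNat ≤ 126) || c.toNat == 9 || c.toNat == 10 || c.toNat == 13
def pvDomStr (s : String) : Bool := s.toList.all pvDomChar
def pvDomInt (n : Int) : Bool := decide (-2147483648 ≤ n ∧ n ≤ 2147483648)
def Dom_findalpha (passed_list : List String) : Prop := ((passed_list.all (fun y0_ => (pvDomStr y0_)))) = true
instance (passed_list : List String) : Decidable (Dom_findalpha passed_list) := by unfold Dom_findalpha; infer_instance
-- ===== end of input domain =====

-- B inverts the loop nesting: letters outer, list inner, eight counts instead of one pass with eight unrolled ifs (objective: simpler).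
-- ===== PORT A =====
-- one pass over passed_list updating eight counters, then the literal dict
def findalphaLoop (l : List String) (st : Int × Int × Int × Int × Int × Int × Int × Int) :
    Int × Int × Int × Int × Int × Int × Int × Int :=
  match l with
  | [] => st
  | a :: rest =>
    let (nA, nB, nC, nD, nE, nF, nG, nH) := st
    let nA := if PySem.Str.isIn "a" a then nA + 1 else nA
    let nB := if PySem.Str.isIn "b" a then nB + 1 else nB
    let nC := if PySem.Str.isIn "c" a then nC + 1 else nC
    let nD := if PySem.Str.isIn "d" a then nD + 1 else nD
    let nE := if PySem.Str.isIn "e" a then nE + 1 else nE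
    let nF := if PySem.Str.isIn "f" a then nF + 1 else nF
    let nG := if PySem.Str.isIn "g" a then nG + 1 else nG
    let nH := if PySem.Str.isIn "h" a then nH + 1 else nH
    findalphaLoop rest (nA, nB, nC, nD, nE, nF, nG, nH)

def findalpha (passed_list : List String) : List (String × Int) :=
  let (nA, nB, nC, nD, nE, nF, nG, nH) := findalphaLoop passed_list (0, 0, 0, 0, 0, 0, 0, 0)
  [("A", nA), ("B", nB), ("C", nC), ("D", nD), ("E", nE), ("F", nF), ("G", nG), ("H", nH)]

-- ===== PORT B =====
-- dict comprehension over zip("abcdefgh", "ABCDEFGH"); sum(1 for a in l if ch in a) ported as countP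
def findalpha_alt (passed_list : List String) : List (String × Int) :=
  (List.zip ["a", "b", "c", "d", "e", "f", "g", "h"]
            ["A", "B", "C", "D", "E", "F", "G", "H"]).map
    (fun p => (p.2, (passed_list.countP (fun a => PySem.Str.isIn p.1 a) : Int)))


-- ===== PRECONDITION & SPEC =====
def Spec_findalpha (passed_list : List String) (out : List (String × Int)) : Prop := out = findalpha_alt passed_list
instance (passed_list : List String) (out : List (String × Int)) : Decidable (Spec_findalpha passed_list out) := by unfold Spec_findalpha; infer_instance

-- ===== CLAIM (what is proved, stated in full; the proofs are below) =====
def Claim_equal_findalpha : Prop := ∀ (passed_list : List String), Dom_findalpha passed_list → Spec_findalpha passed_list (findalpha passed_list)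

-- ===== LEMMAS AND PROOFS =====

-- ===== VERDICT (by name: the statement is the Claim_ definition above) =====
def cnt (ch : String) (l : List String) : Int :=
  (l.countP (fun a => PySem.Str.isIn ch a) : Int)

theorem findalphaLoop_eq (l : List String) (a b c d e f g h : Int) :
    findalphaLoop l (a, b, c, d, e, f, g, h) =
      (a + cnt "a" l, b + cnt "b" l, c + cnt "c" l, d + cnt "d" l,
       e + cnt "e" l, f + cnt "f" l, g + cnt "g" l, h + cnt "h" l) := by
  induction l generalizing a b c d e f g h with
  | nil => simp [findalphaLoop, cnt]
  | cons x t ih =>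
    simp only [findalphaLoop, ih, cnt, List.countP_cons]
    refine Prod.ext ?_ (Prod.ext ?_ (Prod.ext ?_ (Prod.ext ?_ (Prod.ext ?_ (Prod.ext ?_ (Prod.ext ?_ ?_)))))) <;>
      simp <;> split_ifs <;> omega

theorem findalpha_spec : Claim_equal_findalpha := by
  intro l _
  unfold Spec_findalpha
  show findalpha l = findalpha_alt l
  simp [findalpha, findalpha_alt, findalphaLoop_eq, cnt, List.zip]
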